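-- pv_equiv track=rewrite | github.com/oldwizard7/CS639-NLP | convert_json.py | split_into_reasoning_units
-- ===== SOURCE A (Python) =====
-- def split_into_reasoning_units(text):
--     """
--     Split raw model output into reasoning units using blank lines,
--     but avoid splitting inside markdown code blocks.
--     """
--     if not isinstance(text, str):
--         return []
--
--     units = []
--     current_unit = []
--     inside_code_block = False
--
--     lines = text.splitlines()
--
--     for line in lines:
--         stripped = line.strip()
--
--         # Detect start/end of markdown code block
--         if stripped.startswith("```"):
--             inside_code_block = not inside_code_block
--             current_unit.append(line)
--             continue
--
--         # Blank line outside code block means new reasoning unit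
--         if stripped == "" and not inside_code_block:
--             if current_unit:
--                 unit = "\n".join(current_unit).strip()
--                 if unit:
--                     units.append(unit)
--                 current_unit = []
--         else:
--             current_unit.append(line)
--
--     # Add final unit
--     if current_unit:
--         unit = "\n".join(current_unit).strip()
--         if unit:
--             units.append(unit)
--
--     return units
-- ===== SOURCE B (Python) =====
-- def split_into_reasoning_units(text):
--     if not isinstance(text, str):
--         return []
--     # pass 1: mark each line; blank lines outside fenced code blocks become None
--     marked = []
--     in_code = False
--     for line in text.splitlines():
--         s = line.strip()
--         if s.startswith("```"):
--             in_code = not in_code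
--             marked.append(line)
--         elif s == "" and not in_code:
--             marked.append(None)
--         else:
--             marked.append(line)
--     # pass 2: split on the None markers, then join/strip/filter each segment
--     units = []
--     for seg in _segments(marked):
--         u = "\n".join(seg).strip()
--         if u:
--             units.append(u)
--     return units
--
-- def _segments(marked):
--     segs = []
--     cur = []
--     for m in marked:
--         if m is None:
--             segs.append(cur)
--             cur = []
--         else:
--             cur.append(m)
--     segs.append(cur)
--     return segs
-- ===== Notes on version B (the rewrite author's own statement) =====
-- stated objective: alternative
-- what changed: Replaced A's single interleaved state machine (accumulating, emitting and filtering units inside one loop) by a two-pass decomposition: first mark blank-lines-outside-code-blocks with a sentinel while tracking fence parity, then split the marked list on sentinels and join/strip/filter each segment.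
import Mathlib
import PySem

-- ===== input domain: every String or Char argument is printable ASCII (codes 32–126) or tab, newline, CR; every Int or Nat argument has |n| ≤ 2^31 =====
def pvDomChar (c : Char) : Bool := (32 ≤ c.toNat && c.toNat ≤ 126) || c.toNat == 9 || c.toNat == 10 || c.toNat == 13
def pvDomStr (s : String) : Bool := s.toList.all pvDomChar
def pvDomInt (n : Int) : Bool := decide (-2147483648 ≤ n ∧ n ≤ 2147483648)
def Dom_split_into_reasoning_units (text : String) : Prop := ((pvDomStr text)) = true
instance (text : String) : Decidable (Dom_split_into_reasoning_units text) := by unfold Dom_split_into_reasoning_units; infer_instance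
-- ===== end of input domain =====

-- B replaces A's single interleaved state machine by two passes (mark blank-outside-code
-- lines, then split/join/filter); objective: a different decomposition, same cost.

-- ===== PORT A =====
-- A's loop body: state = (units, current_unit, inside_code_block)
def pvAStep (st : List String × List String × Bool) (line : String) :
    List String × List String × Bool :=
  let stripped := PySem.Str.strip line
  if PySem.Str.startswith stripped "```" then
    (st.1, st.2.1 ++ [line], !st.2.2)
  else if stripped == "" && !st.2.2 then
    if st.2.1.isEmpty then st
    else
      let unit := PySem.Str.strip (PySem.Str.join "\n" st.2.1)
      (if unit == "" then st.1 else st.1 ++ [unit], [], st.2.2)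
  else
    (st.1, st.2.1 ++ [line], st.2.2)

def split_into_reasoning_units (text : String) : List String :=
  let lines := PySem.Str.splitlines text
  let st := lines.foldl pvAStep ([], [], false)
  if st.2.1.isEmpty then st.1
  else
    let unit := PySem.Str.strip (PySem.Str.join "\n" st.2.1)
    if unit == "" then st.1 else st.1 ++ [unit]

-- ===== PORT B =====
-- pass 1: mark each line; blank lines outside fenced code blocks become none
def pvBMark (lines : List String) : List (Option String) :=
  (lines.foldl (fun (st : List (Option String) × Bool) line =>
    let s := PySem.Str.strip line
    if PySem.Str.startswith s "```" then (st.1 ++ [some line], !st.2)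
    else if s == "" && !st.2 then (st.1 ++ [none], st.2)
    else (st.1 ++ [some line], st.2)) ([], false)).1

-- helper _segments: split the marked list on the none markers
def pvBSegments (marked : List (Option String)) : List (List String) :=
  let st := marked.foldl (fun (st : List (List String) × List String) m =>
    match m with
    | none => (st.1 ++ [st.2], [])
    | some l => (st.1, st.2 ++ [l])) ([], [])
  st.1 ++ [st.2]

def split_into_reasoning_units_alt (text : String) : List String :=
  let marked := pvBMark (PySem.Str.splitlines text)
  (pvBSegments marked).foldl (fun units seg =>
    let u := PySem.Str.strip (PySem.Str.join "\n" seg)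
    if u == "" then units else units ++ [u]) []

-- ===== PRECONDITION & SPEC =====
def Spec_split_into_reasoning_units (text : String) (out : List String) : Prop := out = split_into_reasoning_units_alt text
instance (text : String) (out : List String) : Decidable (Spec_split_into_reasoning_units text out) := by unfold Spec_split_into_reasoning_units; infer_instance

-- ===== CLAIM (what is proved, stated in full; the proofs are below) =====
def Claim_equal_split_into_reasoning_units : Prop := ∀ (text : String), Dom_split_into_reasoning_units text → Spec_split_into_reasoning_units text (split_into_reasoning_units text)

-- ===== LEMMAS AND PROOFS =====

-- emit one segment: join, strip, keep if non-empty
def pvEmit (cur : List String) : List String :=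
  let u := PySem.Str.strip (PySem.Str.join "\n" cur)
  if u == "" then [] else [u]

-- the common recursive specification of both programs
def pvSpec (cur : List String) (lines : List String) (inside : Bool) : List String :=
  match lines with
  | [] => pvEmit cur
  | l :: ls =>
    let s := PySem.Str.strip l
    if PySem.Str.startswith s "```" then pvSpec (cur ++ [l]) ls (!inside)
    else if s == "" && !inside then pvEmit cur ++ pvSpec [] ls inside
    else pvSpec (cur ++ [l]) ls inside

theorem pvEmit_nil : pvEmit [] = [] := by decide

-- A's final flush, as a named helper for the proof
def pvFlushA (st : List String × List String × Bool) : List String :=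
  if st.2.1.isEmpty then st.1
  else
    let unit := PySem.Str.strip (PySem.Str.join "\n" st.2.1)
    if unit == "" then st.1 else st.1 ++ [unit]

theorem pvFlushA_eq (st : List String × List String × Bool) :
    pvFlushA st = st.1 ++ pvEmit st.2.1 := by
  unfold pvFlushA pvEmit
  cases h : st.2.1 with
  | nil => simp [PySem.Str.join]; decide
  | cons a t => simp only [List.isEmpty_cons, Bool.false_eq_true, if_false]; split_ifs <;> simp

-- A's fold, flushed, equals the spec
theorem pvA_eq_spec (lines units cur : List String) (inside : Bool) :
    pvFlushA (lines.foldl pvAStep (units, cur, inside)) = units ++ pvSpec cur lines inside := by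
  induction lines generalizing units cur inside with
  | nil => simp [pvFlushA_eq, pvSpec]
  | cons l ls ih =>
    simp only [List.foldl_cons, pvSpec, pvAStep]
    split_ifs with h1 h2 h3 h4
    · exact ih ..
    · -- blank outside, cur empty
      rcases List.isEmpty_iff.mp h3 with rfl
      simp [pvEmit_nil, ih ..]
    · -- blank outside, cur nonempty, emitted unit strips to empty
      rw [ih]
      simp [pvEmit, h4]
    · -- blank outside, cur nonempty, unit emitted
      rw [ih]
      simp [pvEmit, h4]
    · exact ih ..

-- B's mark fold with accumulator
def pvMarkRec (lines : List String) (inside : Bool) : List (Option String) :=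
  match lines with
  | [] => []
  | l :: ls =>
    let s := PySem.Str.strip l
    if PySem.Str.startswith s "```" then some l :: pvMarkRec ls (!inside)
    else if s == "" && !inside then none :: pvMarkRec ls inside
    else some l :: pvMarkRec ls inside

theorem pvBMark_fold (lines : List String) (acc : List (Option String)) (inside : Bool) :
    (lines.foldl (fun (st : List (Option String) × Bool) line =>
      let s := PySem.Str.strip line
      if PySem.Str.startswith s "```" then (st.1 ++ [some line], !st.2)
      else if s == "" && !st.2 then (st.1 ++ [none], st.2)
      else (st.1 ++ [some line], st.2)) (acc, inside)).1 =
    acc ++ pvMarkRec lines inside := by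
  induction lines generalizing acc inside with
  | nil => simp [pvMarkRec]
  | cons l ls ih =>
    simp only [List.foldl_cons, pvMarkRec]
    split_ifs <;> rw [ih] <;> simp

def pvSegRec (ms : List (Option String)) (cur : List String) : List (List String) :=
  match ms with
  | [] => [cur]
  | none :: ms' => cur :: pvSegRec ms' []
  | some l :: ms' => pvSegRec ms' (cur ++ [l])

theorem pvBSegments_fold (ms : List (Option String)) (segs : List (List String))
    (cur : List String) :
    (let st := ms.foldl (fun (st : List (List String) × List String) m =>
      match m with
      | none => (st.1 ++ [st.2], [])
      | some l => (st.1, st.2 ++ [l])) (segs, cur)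
     st.1 ++ [st.2]) = segs ++ pvSegRec ms cur := by
  induction ms generalizing segs cur with
  | nil => simp [pvSegRec]
  | cons m ms' ih =>
    cases m <;> simp only [List.foldl_cons, pvSegRec] <;> rw [ih] <;> simp

theorem pvEmitFold (segs : List (List String)) (units : List String) :
    segs.foldl (fun units seg =>
      let u := PySem.Str.strip (PySem.Str.join "\n" seg)
      if u == "" then units else units ++ [u]) units =
    units ++ segs.flatMap pvEmit := by
  induction segs generalizing units with
  | nil => simp
  | cons seg segs' ih =>
    simp only [List.foldl_cons, List.flatMap_cons, pvEmit]
    split_ifs <;> rw [ih] <;> simp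

theorem pvSpec_eq_segments (lines : List String) (cur : List String) (inside : Bool) :
    pvSpec cur lines inside = (pvSegRec (pvMarkRec lines inside) cur).flatMap pvEmit := by
  induction lines generalizing cur inside with
  | nil => simp [pvSpec, pvMarkRec, pvSegRec]
  | cons l ls ih =>
    simp only [pvSpec, pvMarkRec]
    split_ifs <;> simp [pvSegRec, ih]

theorem pvBSegments_eq (ms : List (Option String)) : pvBSegments ms = pvSegRec ms [] := by
  simpa using pvBSegments_fold ms [] []

-- ===== VERDICT (by name: the statement is the Claim_ definition above) =====
theorem split_into_reasoning_units_spec : Claim_equal_split_into_reasoning_units := by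
  intro text _
  show split_into_reasoning_units text = split_into_reasoning_units_alt text
  unfold split_into_reasoning_units split_into_reasoning_units_alt pvBMark
  rw [show (let lines := PySem.Str.splitlines text
            let st := lines.foldl pvAStep ([], [], false)
            if st.2.1.isEmpty then st.1
            else
              let unit := PySem.Str.strip (PySem.Str.join "\n" st.2.1)
              if unit == "" then st.1 else st.1 ++ [unit]) =
        pvFlushA ((PySem.Str.splitlines text).foldl pvAStep ([], [], false)) from rfl,
      pvA_eq_spec, pvBMark_fold]
  simp only [pvBSegments_eq, List.nil_append]
  rw [pvEmitFold]
  simp [pvSpec_eq_segments]
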